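-- pv_equiv track=rewrite | github.com/annayang26/calcium_analyze | test.py | _select_color
-- ===== SOURCE A (Python) =====
-- COLOR_LIST = ['xkcd:purple', 'xkcd:light purple', 'xkcd:blue', 'xkcd:light blue', 'xkcd:dark green', 'xkcd:soft green']
--
-- def _select_color(geno_dict: dict):
--     """Select color based on the genotype."""
--     color_list = {}
--     control_start = 0
--     het_start = 2
--     null_start = 4
--     for index, geno in geno_dict.items():
--         if geno == "control":
--             color_list[index] = COLOR_LIST[control_start]
--             control_start += 1
--         elif geno == "het":
--             color_list[index] = COLOR_LIST[het_start]
--             het_start += 1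
--         elif geno == "null":
--             color_list[index] = COLOR_LIST[null_start]
--             null_start += 1
--     return color_list
-- ===== SOURCE B (Python) =====
-- COLOR_LIST = ['xkcd:purple', 'xkcd:light purple', 'xkcd:blue', 'xkcd:light blue', 'xkcd:dark green', 'xkcd:soft green']
--
-- def _select_color(geno_dict: dict):
--     """Select color based on the genotype (group-then-emit formulation)."""
--     OFFSET = {"control": 0, "het": 2, "null": 4}
--     groups = {g: [] for g in OFFSET}
--     for p, (index, geno) in enumerate(geno_dict.items()):
--         if geno in groups:
--             groups[geno].append((p, index))
--     colored = []
--     for geno, members in groups.items():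
--         off = OFFSET[geno]
--         for i, (p, index) in enumerate(members):
--             colored.append((p, index, COLOR_LIST[off + i]))
--     colored.sort(key=lambda t: t[0])
--     return {index: color for _, index, color in colored}
-- ===== Notes on version B (the rewrite author's own statement) =====
-- stated objective: alternative
-- what changed: A interleaves one pass with three mutable per-genotype counters; B first groups the (position, key) pairs per genotype, then emits each group's colors as offset+rank from a table, and restores insertion order by sorting on the recorded position.
import Mathlib
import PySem

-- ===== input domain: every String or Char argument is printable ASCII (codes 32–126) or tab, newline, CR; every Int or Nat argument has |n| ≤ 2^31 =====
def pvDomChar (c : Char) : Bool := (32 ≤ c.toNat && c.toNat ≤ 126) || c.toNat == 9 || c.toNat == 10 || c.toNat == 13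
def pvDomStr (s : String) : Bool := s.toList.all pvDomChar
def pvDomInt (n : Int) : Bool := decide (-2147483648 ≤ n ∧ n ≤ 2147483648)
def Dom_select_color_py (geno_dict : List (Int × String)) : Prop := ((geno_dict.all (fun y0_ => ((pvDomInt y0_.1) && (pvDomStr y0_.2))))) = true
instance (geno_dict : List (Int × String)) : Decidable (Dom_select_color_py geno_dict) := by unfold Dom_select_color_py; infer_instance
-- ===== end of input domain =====

-- B replaces A's interleaved three-counter pass by group-then-emit (offset + rank per group, re-sorted by position): an alternative decomposition, not claimed faster.


def pvCOLOR_LIST : List String :=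
  ["xkcd:purple", "xkcd:light purple", "xkcd:blue", "xkcd:light blue", "xkcd:dark green", "xkcd:soft green"]

-- ===== PORT A =====
-- the loop over geno_dict.items() with the dict color_list and the three counters;
-- COLOR_LIST[c] is pyGet?; the .getD "" arm is unreachable under Pre_ (Python raises IndexError there)
def selGoA : List (Int × String) → PySem.Dict Int String → Int → Int → Int → PySem.Dict Int String
  | [], d, _, _, _ => d
  | (index, geno) :: rest, d, c, h, n =>
    if geno = "control" then selGoA rest (d.insert index ((PySem.List.pyGet? pvCOLOR_LIST c).getD "")) (c + 1) h n
    else if geno = "het" then selGoA rest (d.insert index ((PySem.List.pyGet? pvCOLOR_LIST h).getD "")) c (h + 1) n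
    else if geno = "null" then selGoA rest (d.insert index ((PySem.List.pyGet? pvCOLOR_LIST n).getD "")) c h (n + 1)
    else selGoA rest d c h n

def select_color_py (geno_dict : List (Int × String)) : List (Int × String) :=
  (selGoA geno_dict PySem.Dict.empty 0 2 4).items

-- ===== PORT B =====
def pvOFFSET : PySem.Dict String Int := PySem.Dict.mk [("control", 0), ("het", 2), ("null", 4)]

-- pass 1: groups[geno].append((p, index)) for genotypes present in groups
def selGroups : List (Int × (Int × String)) → PySem.Dict String (List (Int × Int)) → PySem.Dict String (List (Int × Int))
  | [], d => d
  | (p, (index, geno)) :: rest, d =>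
    if d.contains geno then selGroups rest (d.modify geno [] (· ++ [(p, index)]))
    else selGroups rest d

def select_color_py_alt (geno_dict : List (Int × String)) : List (Int × String) :=
  let groups := selGroups (PySem.List.enumerate geno_dict 0)
      (PySem.Dict.mk [("control", []), ("het", []), ("null", [])])
  -- pass 2: colored.append((p, index, COLOR_LIST[off + i])); OFFSET[geno] always hits (keys ⊆ OFFSET), ported as getD
  let colored := groups.items.foldl (fun acc gm =>
      (PySem.List.enumerate gm.2 0).foldl (fun acc2 e =>
        acc2 ++ [(e.2.1, e.2.2, (PySem.List.pyGet? pvCOLOR_LIST (pvOFFSET.getD gm.1 0 + e.1)).getD "")]) acc) []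
  let sortedColored := PySem.List.sorted colored (fun t => t.1) false
  (sortedColored.foldl (fun d t => PySem.Dict.insert d t.2.1 t.2.2) PySem.Dict.empty).items

-- ===== PRECONDITION & SPEC =====
-- Pre_ excludes exactly the inputs where Python A raises IndexError (a 7th "control", 5th "het" or 3rd "null" runs COLOR_LIST out); Python B raises there too.
def Pre_select_color_py (geno_dict : List (Int × String)) : Prop :=
  (geno_dict.map Prod.snd).count "control" ≤ 6 ∧
  (geno_dict.map Prod.snd).count "het" ≤ 4 ∧
  (geno_dict.map Prod.snd).count "null" ≤ 2
instance (geno_dict : List (Int × String)) : Decidable (Pre_select_color_py geno_dict) := by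
  unfold Pre_select_color_py; infer_instance
def pvWitness_select_color_py : (List (Int × String)) := [(1, "control"), (2, "het"), (3, "null")]

def Spec_select_color_py (geno_dict : List (Int × String)) (out : List (Int × String)) : Prop := out = select_color_py_alt geno_dict
instance (geno_dict : List (Int × String)) (out : List (Int × String)) : Decidable (Spec_select_color_py geno_dict out) := by unfold Spec_select_color_py; infer_instance

-- ===== CLAIM (what is proved, stated in full; the proofs are below) =====
def Claim_equal_select_color_py : Prop := ∀ (geno_dict : List (Int × String)), Dom_select_color_py geno_dict → Pre_select_color_py geno_dict → Spec_select_color_py geno_dict (select_color_py geno_dict)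

-- ===== LEMMAS AND PROOFS =====

-- the common reference: the (position, key, color) triples in input order, with absolute color counters
def selCanon : List (Int × String) → Int → Int → Int → Int → List (Int × Int × String)
  | [], _, _, _, _ => []
  | (index, geno) :: rest, p, c, h, n =>
    if geno = "control" then (p, index, (PySem.List.pyGet? pvCOLOR_LIST c).getD "") :: selCanon rest (p + 1) (c + 1) h n
    else if geno = "het" then (p, index, (PySem.List.pyGet? pvCOLOR_LIST h).getD "") :: selCanon rest (p + 1) c (h + 1) n
    else if geno = "null" then (p, index, (PySem.List.pyGet? pvCOLOR_LIST n).getD "") :: selCanon rest (p + 1) c h (n + 1)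
    else selCanon rest (p + 1) c h n

lemma selGoA_eq_canon : ∀ (l : List (Int × String)) (d : PySem.Dict Int String) (p c h n : Int),
    selGoA l d c h n = (selCanon l p c h n).foldl (fun d t => PySem.Dict.insert d t.2.1 t.2.2) d := by
  intro l
  induction l with
  | nil => intro d p c h n; simp [selGoA, selCanon]
  | cons x rest ih =>
    intro d p c h n
    obtain ⟨index, geno⟩ := x
    by_cases h1 : geno = "control" <;> by_cases h2 : geno = "het" <;> by_cases h3 : geno = "null" <;>
      simp only [selGoA, selCanon, h1, h2, h3, if_true, if_false, List.foldl_cons] <;>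
      exact ih _ (p + 1) _ _ _

-- members of a genotype in pass 1
def selMem (g0 : String) (l : List (Int × (Int × String))) : List (Int × Int) :=
  (l.filter (fun e => e.2.2 == g0)).map (fun e => (e.1, e.2.1))

lemma selGroups_items : ∀ (l : List (Int × (Int × String))) (a b c : List (Int × Int)),
    (selGroups l (PySem.Dict.mk [("control", a), ("het", b), ("null", c)])).items
      = [("control", a ++ selMem "control" l), ("het", b ++ selMem "het" l), ("null", c ++ selMem "null" l)] := by
  intro l
  induction l with
  | nil => intro a b c; simp [selGroups, selMem]
  | cons x rest ih =>
    intro a b c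
    obtain ⟨p, index, geno⟩ := x
    by_cases h1 : geno = "control"
    · subst h1
      simp only [selGroups, selMem, List.filter_cons]
      norm_num [PySem.Dict.contains, PySem.Dict.modify, PySem.Dict.getD, PySem.Dict.get?, PySem.Dict.insert]
      simpa [selMem] using ih (a ++ [(p, index)]) b c
    · by_cases h2 : geno = "het"
      · subst h2
        simp only [selGroups, selMem, List.filter_cons]
        norm_num [PySem.Dict.contains, PySem.Dict.modify, PySem.Dict.getD, PySem.Dict.get?, PySem.Dict.insert]
        simpa [selMem] using ih a (b ++ [(p, index)]) c
      · by_cases h3 : geno = "null"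
        · subst h3
          simp only [selGroups, selMem, List.filter_cons]
          norm_num [PySem.Dict.contains, PySem.Dict.modify, PySem.Dict.getD, PySem.Dict.get?, PySem.Dict.insert]
          simpa [selMem] using ih a b (c ++ [(p, index)])
        · have hc : (PySem.Dict.mk [("control", a), ("het", b), ("null", c)]).contains geno = false := by
            simp only [PySem.Dict.contains_mk, List.any_cons, List.any_nil, Bool.or_false,
              Bool.or_eq_false_iff, beq_eq_false_iff_ne, ne_eq]
            exact ⟨fun h => h1 h.symm, fun h => h2 h.symm, fun h => h3 h.symm⟩
          simp only [selGroups, hc, Bool.false_eq_true, if_false]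
          simpa [selMem, h1, h2, h3] using ih a b c

-- emission of one group with absolute color start s
def selEmit (s : Int) (ms : List (Int × Int)) : List (Int × Int × String) :=
  (PySem.List.enumerate ms s).map (fun e => (e.2.1, e.2.2, (PySem.List.pyGet? pvCOLOR_LIST e.1).getD ""))

lemma selEmit_shift (off : Int) : ∀ (ms : List (Int × Int)) (s : Int),
    (PySem.List.enumerate ms s).map (fun e => (e.2.1, e.2.2, (PySem.List.pyGet? pvCOLOR_LIST (off + e.1)).getD ""))
      = selEmit (off + s) ms := by
  intro ms
  induction ms with
  | nil => intro s; simp [selEmit, PySem.List.enumerate_nil]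
  | cons m rest ih =>
    intro s
    simp only [selEmit, PySem.List.enumerate_cons, List.map_cons] at *
    rw [ih (s + 1), show off + (s + 1) = off + s + 1 by omega]

lemma selCanon_perm : ∀ (l : List (Int × String)) (p c h n : Int),
    List.Perm
      (selEmit c (selMem "control" (PySem.List.enumerate l p))
        ++ selEmit h (selMem "het" (PySem.List.enumerate l p))
        ++ selEmit n (selMem "null" (PySem.List.enumerate l p)))
      (selCanon l p c h n) := by
  intro l
  induction l with
  | nil => intro p c h n; simp [selEmit, selMem, selCanon, PySem.List.enumerate_nil]
  | cons x rest ih =>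
    intro p c h n
    obtain ⟨index, geno⟩ := x
    have hmem : ∀ (g0 : String), selMem g0 (PySem.List.enumerate ((index, geno) :: rest) p)
        = if geno = g0 then (p, index) :: selMem g0 (PySem.List.enumerate rest (p + 1))
          else selMem g0 (PySem.List.enumerate rest (p + 1)) := by
      intro g0
      by_cases hg : geno = g0 <;>
        simp [selMem, PySem.List.enumerate_cons, hg]
    have hemit : ∀ (s : Int) (q : Int × Int) (ms : List (Int × Int)),
        selEmit s (q :: ms) = (q.1, q.2, (PySem.List.pyGet? pvCOLOR_LIST s).getD "") :: selEmit (s + 1) ms := by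
      intro s q ms; simp [selEmit, PySem.List.enumerate_cons]
    by_cases h1 : geno = "control"
    · subst h1
      simp only [hmem, String.reduceEq, reduceIte, hemit, selCanon, List.cons_append]
      exact ((ih (p + 1) (c + 1) h n)).cons _
    · by_cases h2 : geno = "het"
      · subst h2
        simp only [hmem, String.reduceEq, reduceIte, hemit, selCanon]
        rw [show ∀ (A B C : List (Int × Int × String)) (x : Int × Int × String),
              A ++ (x :: B) ++ C = A ++ x :: (B ++ C) by intro A B C x; simp]
        refine (List.perm_middle).trans (List.Perm.cons _ ?_)
        simpa [List.append_assoc] using ih (p + 1) c (h + 1) n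
      · by_cases h3 : geno = "null"
        · subst h3
          simp only [hmem, String.reduceEq, reduceIte, hemit, selCanon]
          rw [show ∀ (A B C : List (Int × Int × String)) (x : Int × Int × String),
                A ++ B ++ (x :: C) = (A ++ B) ++ x :: C by intro A B C x; simp]
          refine (List.perm_middle).trans ?_
          refine List.Perm.cons _ ?_
          simpa [List.append_assoc] using (ih (p + 1) c h (n + 1))
        · simp only [hmem, if_neg h1, if_neg h2, if_neg h3, selCanon]
          exact ih (p + 1) c h n

lemma selCanon_pos_le : ∀ (l : List (Int × String)) (p c h n : Int) (t : Int × Int × String),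
    t ∈ selCanon l p c h n → p ≤ t.1 := by
  intro l
  induction l with
  | nil => intro p c h n t ht; simp [selCanon] at ht
  | cons x rest ih =>
    intro p c h n t ht
    obtain ⟨index, geno⟩ := x
    by_cases h1 : geno = "control" <;> by_cases h2 : geno = "het" <;> by_cases h3 : geno = "null" <;>
      simp only [selCanon, h1, h2, h3, String.reduceEq, if_true, if_false, List.mem_cons] at ht <;>
      first
        | (rcases ht with ht | ht
           · subst ht; simp
           · have := ih (p + 1) _ _ _ _ ht; omega)
        | (have := ih (p + 1) _ _ _ _ ht; omega)

lemma selCanon_pairwise : ∀ (l : List (Int × String)) (p c h n : Int),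
    (selCanon l p c h n).Pairwise (fun a b => a.1 < b.1) := by
  intro l
  induction l with
  | nil => intro p c h n; simp [selCanon]
  | cons x rest ih =>
    intro p c h n
    obtain ⟨index, geno⟩ := x
    by_cases h1 : geno = "control" <;> by_cases h2 : geno = "het" <;> by_cases h3 : geno = "null" <;>
      simp only [selCanon, h1, h2, h3, String.reduceEq, if_true, if_false] <;>
      first
        | exact ih (p + 1) _ _ _
        | (refine List.Pairwise.cons ?_ (ih (p + 1) _ _ _);
           intro t ht; have := selCanon_pos_le rest (p + 1) _ _ _ t ht; simpa using by omega)

-- ===== VERDICT (by name: the statement is the Claim_ definition above) =====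
theorem select_color_py_spec : Claim_equal_select_color_py := by
  intro g _ _
  unfold Spec_select_color_py select_color_py select_color_py_alt
  rw [selGoA_eq_canon g PySem.Dict.empty 0 0 2 4]
  simp only [selGroups_items, List.foldl_cons, List.foldl_nil, List.nil_append,
    PySem.List.foldl_append_singleton_eq_map, selEmit_shift]
  have e1 : pvOFFSET.getD "control" 0 + 0 = (0 : Int) := by decide
  have e2 : pvOFFSET.getD "het" 0 + 0 = (2 : Int) := by decide
  have e3 : pvOFFSET.getD "null" 0 + 0 = (4 : Int) := by decide
  rw [e1, e2, e3]
  rw [PySem.List.sorted_eq_of_perm_of_pairwise_lt _ (selCanon g 0 0 2 4) (fun t => t.1)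
    (selCanon_perm g 0 0 2 4).symm (selCanon_pairwise g 0 0 2 4)]
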